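-- pv_equiv track=rewrite | github.com/seret1234-dot/weiss-chess-training | bn_manual_sets/bn positions_24-3-2026/bn2/4/reorder_positions_8_to_9_white_two_piece_change_v2.py | analyze_order
-- ===== SOURCE A (Python) =====
-- from typing import List, Dict, Tuple, Optional
--
-- def parse_fen_piece_squares(fen: str) -> Dict[str, str]:
--     parts = fen.split()
--     board = parts[0]
--     ranks = board.split("/")
--
--     out = {}
--     for r_index, rank in enumerate(ranks):
--         file_idx = 0
--         for ch in rank:
--             if ch.isdigit():
--                 file_idx += int(ch)
--             else:
--                 sq = f"{'abcdefgh'[file_idx]}{8 - r_index}"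
--                 out[ch] = sq
--                 file_idx += 1
--     return out
--
-- def get_white_squares(pos: dict) -> Dict[str, str]:
--     wk = pos.get("white_king")
--     wn = pos.get("white_knight")
--     wb = pos.get("white_bishop")
--
--     if wk and wn and wb:
--         return {"K": wk, "N": wn, "B": wb}
--
--     fen = pos.get("fen")
--     if not fen:
--         return {"K": "?", "N": "?", "B": "?"}
--
--     mp = parse_fen_piece_squares(fen)
--     return {
--         "K": mp.get("K", "?"),
--         "N": mp.get("N", "?"),
--         "B": mp.get("B", "?"),
--     }
--
-- def change_signature(pos_a: dict, pos_b: dict) -> str: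
--     a = get_white_squares(pos_a)
--     b = get_white_squares(pos_b)
--
--     changed = []
--     if a["B"] != b["B"]:
--         changed.append("B")
--     if a["K"] != b["K"]:
--         changed.append("K")
--     if a["N"] != b["N"]:
--         changed.append("N")
--
--     return "".join(changed)
--
-- def analyze_order(data: List[dict]) -> Dict[str, int]:
--     if len(data) <= 1:
--         return {
--             "transitions": 0,
--             "good_two_plus": 0,
--             "bad_under_two": 0,
--             "repeat_sig": 0,
--             "three_changed": 0,
--         }
--
--     good_two_plus = 0
--     bad_under_two = 0
--     repeat_sig = 0
--     three_changed = 0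
--     prev_sig = None
--
--     for i in range(len(data) - 1):
--         sig = change_signature(data[i], data[i + 1])
--
--         if len(sig) >= 2:
--             good_two_plus += 1
--         else:
--             bad_under_two += 1
--
--         if len(sig) == 3:
--             three_changed += 1
--
--         if prev_sig is not None and sig == prev_sig:
--             repeat_sig += 1
--
--         prev_sig = sig
--
--     return {
--         "transitions": len(data) - 1,
--         "good_two_plus": good_two_plus,
--         "bad_under_two": bad_under_two,
--         "repeat_sig": repeat_sig,
--         "three_changed": three_changed,
--     }
-- ===== SOURCE B (Python) =====
-- from typing import List, Dict
--
-- # B re-decomposes: change_signature as a filter over "BKN"; analyze_order builds the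
-- # signature list once, tallies a histogram of signature lengths for the length-based
-- # stats, and gets repeat_sig as len(sigs) minus the number of runs of equal signatures.
--
-- def parse_fen_piece_squares(fen: str) -> Dict[str, str]:
--     parts = fen.split()
--     board = parts[0]
--     ranks = board.split("/")
--
--     out = {}
--     for r_index, rank in enumerate(ranks):
--         file_idx = 0
--         for ch in rank:
--             if ch.isdigit():
--                 file_idx += int(ch)
--             else:
--                 sq = f"{'abcdefgh'[file_idx]}{8 - r_index}"
--                 out[ch] = sq
--                 file_idx += 1
--     return out
--
-- def get_white_squares(pos: dict) -> Dict[str, str]: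
--     wk = pos.get("white_king")
--     wn = pos.get("white_knight")
--     wb = pos.get("white_bishop")
--
--     if wk and wn and wb:
--         return {"K": wk, "N": wn, "B": wb}
--
--     fen = pos.get("fen")
--     if not fen:
--         return {"K": "?", "N": "?", "B": "?"}
--
--     mp = parse_fen_piece_squares(fen)
--     return {
--         "K": mp.get("K", "?"),
--         "N": mp.get("N", "?"),
--         "B": mp.get("B", "?"),
--     }
--
-- def change_signature(pos_a: dict, pos_b: dict) -> str:
--     a = get_white_squares(pos_a)
--     b = get_white_squares(pos_b)
--     return "".join(p for p in "BKN" if a[p] != b[p])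
--
-- def analyze_order(data: List[dict]) -> Dict[str, int]:
--     sigs = list(map(change_signature, data, data[1:]))
--
--     hist = {}
--     for s in sigs:
--         hist[len(s)] = hist.get(len(s), 0) + 1
--
--     runs = sum(1 for prev, cur in zip([None] + sigs, sigs) if prev != cur)
--
--     return {
--         "transitions": len(sigs),
--         "good_two_plus": hist.get(2, 0) + hist.get(3, 0),
--         "bad_under_two": hist.get(0, 0) + hist.get(1, 0),
--         "repeat_sig": len(sigs) - runs,
--         "three_changed": hist.get(3, 0),
--     }
-- ===== Notes on version B (the rewrite author's own statement) =====
-- stated objective: alternative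
-- what changed: analyze_order's stateful counter-and-prev_sig loop is replaced by building the signature list once, tallying a histogram of signature lengths from which good_two_plus/bad_under_two/three_changed are read off, and computing repeat_sig indirectly as len(sigs) minus the number of runs of consecutive equal signatures; change_signature becomes a filter over the piece string 'BKN'.
import Mathlib
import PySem

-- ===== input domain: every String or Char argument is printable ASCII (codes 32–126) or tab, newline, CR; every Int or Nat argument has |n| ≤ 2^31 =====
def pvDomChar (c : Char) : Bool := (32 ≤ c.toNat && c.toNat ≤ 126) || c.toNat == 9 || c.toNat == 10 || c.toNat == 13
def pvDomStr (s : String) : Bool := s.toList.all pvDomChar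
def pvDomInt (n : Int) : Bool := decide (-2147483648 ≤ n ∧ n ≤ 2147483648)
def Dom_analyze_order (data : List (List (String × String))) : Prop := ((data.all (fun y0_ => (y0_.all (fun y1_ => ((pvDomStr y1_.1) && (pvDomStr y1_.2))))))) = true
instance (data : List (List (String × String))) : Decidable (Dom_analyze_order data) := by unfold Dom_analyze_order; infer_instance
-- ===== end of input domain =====

-- B recomputes the same stats by a single signature list, a histogram of signature
-- lengths and a run-count complement for repeat_sig (objective: alternative, not faster).
-- ===== PORT A =====

-- truthiness of pos.get(...) (None or a string; truthy = present and non-empty)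
def pvTruthy (o : Option String) : Bool :=
  match o with
  | some s => s != ""
  | none => false

-- returns none where the Python raises (parts[0] IndexError, 'abcdefgh'[file_idx] IndexError)
def parse_fen_piece_squares (fen : String) : Option (PySem.Dict String String) :=
  let parts := PySem.Str.split₀ fen
  match PySem.List.pyGet? parts 0 with
  | none => none   -- parts[0] raises IndexError
  | some board =>
    -- board.split("/"): the separator is the literal "/" ≠ "", so split? is always some (exact)
    let ranks := (PySem.Str.split? board "/").getD []
    (PySem.List.enumerate ranks 0).foldl
      (fun acc? rr =>
        acc?.bind (fun out =>
          (rr.2.toList.foldl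
            (fun st? ch =>
              st?.bind (fun st =>
                if PySem.Chars.isdigit ch then
                  match PySem.Int.ofStr? (String.mk [ch]) with
                  | none => none   -- int(ch): unreachable when ch.isdigit
                  | some v => some (st.1 + v, st.2)
                else
                  match PySem.Str.pyGet? "abcdefgh" st.1 with
                  | none => none   -- 'abcdefgh'[file_idx] raises IndexError
                  | some letter =>
                    -- sq = f"{'abcdefgh'[file_idx]}{8 - r_index}"
                    some (st.1 + 1,
                      st.2.insert (String.mk [ch])
                        (String.mk (letter :: PySem.Int.toChars (8 - rr.1))))))
            (some ((0 : Int), out))).map (·.2)))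
      (some (PySem.Dict.empty))

def get_white_squares (pos : PySem.Dict String String) : Option (PySem.Dict String String) :=
  let wk := pos.get? "white_king"
  let wn := pos.get? "white_knight"
  let wb := pos.get? "white_bishop"
  if pvTruthy wk && pvTruthy wn && pvTruthy wb then
    some (PySem.Dict.ofList [("K", wk.getD ""), ("N", wn.getD ""), ("B", wb.getD "")])
  else
    let fen := pos.get? "fen"
    if !pvTruthy fen then
      some (PySem.Dict.ofList [("K", "?"), ("N", "?"), ("B", "?")])
    else
      match parse_fen_piece_squares (fen.getD "") with
      | none => none
      | some mp =>
        some (PySem.Dict.ofList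
          [("K", mp.getD "K" "?"), ("N", mp.getD "N" "?"), ("B", mp.getD "B" "?")])

def change_signature (pos_a pos_b : PySem.Dict String String) : Option String :=
  (get_white_squares pos_a).bind (fun a =>
  (get_white_squares pos_b).bind (fun b =>
    -- a["B"] etc.: every dict returned by get_white_squares has keys "K","N","B", so getD is exact
    let changed :=
      (if a.getD "B" "" != b.getD "B" "" then ["B"] else []) ++
      (if a.getD "K" "" != b.getD "K" "" then ["K"] else []) ++
      (if a.getD "N" "" != b.getD "N" "" then ["N"] else [])
    some (PySem.Str.join "" changed)))

def analyze_order (data : List (List (String × String))) : List (String × Int) :=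
  if data.length ≤ 1 then
    [("transitions", 0), ("good_two_plus", 0), ("bad_under_two", 0),
     ("repeat_sig", 0), ("three_changed", 0)]
  else
    let res := (PySem.List.pyRange 0 ((data.length : Int) - 1) 1).foldl
      (fun st? i =>
        st?.bind (fun st =>
          (change_signature (PySem.Dict.mk (PySem.List.pyGetD data i []))
                            (PySem.Dict.mk (PySem.List.pyGetD data (i + 1) []))).map
            (fun sig =>
              (if 2 ≤ PySem.Str.len sig then st.1 + 1 else st.1,
               if 2 ≤ PySem.Str.len sig then st.2.1 else st.2.1 + 1,
               (match st.2.2.2.2 with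
                | some p => if sig == p then st.2.2.1 + 1 else st.2.2.1
                | none => st.2.2.1),
               (if PySem.Str.len sig == 3 then st.2.2.2.1 + 1 else st.2.2.2.1),
               some sig))))
      (some ((0 : Int), (0 : Int), (0 : Int), (0 : Int), (none : Option String)))
    match res with
    | none => []   -- the Python raises here; excluded by Pre_analyze_order
    | some st =>
      [("transitions", (data.length : Int) - 1), ("good_two_plus", st.1),
       ("bad_under_two", st.2.1), ("repeat_sig", st.2.2.1), ("three_changed", st.2.2.2.1)]

-- ===== PORT B =====
-- B's helpers parse_fen_piece_squares and get_white_squares are textually identical to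
-- A's, so the Lean definitions above are shared; change_signature differs and is ported.

-- "".join(p for p in "BKN" if a[p] != b[p])  (a[p] exact via getD: keys always present)
def change_signature_alt (pos_a pos_b : PySem.Dict String String) : Option String :=
  (get_white_squares pos_a).bind (fun a =>
  (get_white_squares pos_b).bind (fun b =>
    some (PySem.Str.join ""
      ((("BKN".toList.filter (fun p =>
           a.getD (String.mk [p]) "" != b.getD (String.mk [p]) "")).map
         (fun p => String.mk [p]))))))

def analyze_order_alt (data : List (List (String × String))) : List (String × Int) :=
  -- sigs = list(map(change_signature, data, data[1:]))
  match (data.zip (PySem.List.slice data (some 1) none)).mapM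
          (fun p => change_signature_alt (PySem.Dict.mk p.1) (PySem.Dict.mk p.2)) with
  | none => []   -- the Python raises here; excluded by Pre_analyze_order
  | some sigs =>
    -- hist[len(s)] = hist.get(len(s), 0) + 1
    let hist := sigs.foldl
      (fun d s => d.insert (PySem.Str.len s) (d.getD (PySem.Str.len s) 0 + 1))
      (PySem.Dict.empty : PySem.Dict Int Int)
    -- runs = sum(1 for prev, cur in zip([None] + sigs, sigs) if prev != cur)
    let runs : Int :=
      (((none :: sigs.map some).zip sigs).countP (fun q => q.1 != some q.2) : Nat)
    [("transitions", (sigs.length : Int)),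
     ("good_two_plus", hist.getD 2 0 + hist.getD 3 0),
     ("bad_under_two", hist.getD 0 0 + hist.getD 1 0),
     ("repeat_sig", (sigs.length : Int) - runs),
     ("three_changed", hist.getD 3 0)]

-- ===== PRECONDITION & SPEC =====
-- Pre_ excludes exactly the inputs on which the Python raises IndexError while parsing a
-- malformed truthy "fen" (empty board field, or a rank whose file index passes 'h').
def pvFenWeight (cs : List Char) : Int :=
  (cs.map (fun ch => if PySem.Chars.isdigit ch then ((ch.toNat : Int) - 48) else 1)).sum

def pvFenOk (fen : String) : Bool :=
  let parts := PySem.Str.split₀ fen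
  !parts.isEmpty &&
    (((PySem.Str.split? (parts.headD "") "/").getD []).all (fun rank =>
      (List.range rank.toList.length).all (fun j =>
        PySem.Chars.isdigit (rank.toList.getD j ' ') || decide (pvFenWeight (rank.toList.take j) ≤ 7))))

def pvPosOk (pos : List (String × String)) : Bool :=
  let d := PySem.Dict.mk pos
  (pvTruthy (d.get? "white_king") && pvTruthy (d.get? "white_knight") && pvTruthy (d.get? "white_bishop"))
  || !pvTruthy (d.get? "fen") || pvFenOk ((d.get? "fen").getD "")

def Pre_analyze_order (data : List (List (String × String))) : Prop :=
  data.length ≤ 1 ∨ data.all pvPosOk = true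

instance (data : List (List (String × String))) : Decidable (Pre_analyze_order data) := by
  unfold Pre_analyze_order; infer_instance

def pvWitness_analyze_order : (List (List (String × String))) :=
  [[("fen", "B1K1N3 w - - 0 1")], [("fen", "1B1K1N2 w - - 0 1")]]

def Spec_analyze_order (data : List (List (String × String))) (out : List (String × Int)) : Prop :=
  out = analyze_order_alt data
instance (data : List (List (String × String))) (out : List (String × Int)) : Decidable (Spec_analyze_order data out) := by
  unfold Spec_analyze_order; infer_instance

-- ===== CLAIM (what is proved, stated in full; the proofs are below) =====
def Claim_equal_analyze_order : Prop :=
  ∀ (data : List (List (String × String))), Dom_analyze_order data → Pre_analyze_order data →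
    Spec_analyze_order data (analyze_order data)

-- ===== LEMMAS AND PROOFS =====

-- the two change_signature implementations agree
theorem pv_sig_eq (pa pb : PySem.Dict String String) :
    change_signature pa pb = change_signature_alt pa pb := by
  unfold change_signature change_signature_alt
  cases get_white_squares pa with
  | none => rfl
  | some a =>
    cases get_white_squares pb with
    | none => rfl
    | some b =>
      simp only [Option.bind_some, Option.some_inj]
      by_cases h1 : (a.getD "B" "" != b.getD "B" "") = true <;>
      by_cases h2 : (a.getD "K" "" != b.getD "K" "") = true <;>
      by_cases h3 : (a.getD "N" "" != b.getD "N" "") = true <;>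
      simp [h1, h2, h3, show ("BKN" : String).toList = ['B', 'K', 'N'] from rfl,
            show String.mk ['B'] = "B" from rfl, show String.mk ['K'] = "K" from rfl,
            show String.mk ['N'] = "N" from rfl, List.filter]

-- every signature has length 0..3
theorem pv_sig_len (pa pb : PySem.Dict String String) (s : String)
    (h : change_signature pa pb = some s) :
    PySem.Str.len s = 0 ∨ PySem.Str.len s = 1 ∨ PySem.Str.len s = 2 ∨ PySem.Str.len s = 3 := by
  unfold change_signature at h
  cases ha : get_white_squares pa with
  | none => rw [ha] at h; simp at h
  | some a =>
    cases hb : get_white_squares pb with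
    | none => rw [ha, hb] at h; simp at h
    | some b =>
      rw [ha, hb] at h
      simp only [Option.bind_some, Option.some_inj] at h
      subst h
      by_cases h1 : (a.getD "B" "" != b.getD "B" "") = true <;>
      by_cases h2 : (a.getD "K" "" != b.getD "K" "") = true <;>
      by_cases h3 : (a.getD "N" "" != b.getD "N" "") = true <;>
      simp [h1, h2, h3] <;> decide

def pvSig (p : List (String × String) × List (String × String)) : Option String :=
  change_signature (PySem.Dict.mk p.1) (PySem.Dict.mk p.2)

def pvStep (st : Int × Int × Int × Int × Option String) (sig : String) :
    Int × Int × Int × Int × Option String :=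
  (if 2 ≤ PySem.Str.len sig then st.1 + 1 else st.1,
   if 2 ≤ PySem.Str.len sig then st.2.1 else st.2.1 + 1,
   (match st.2.2.2.2 with
    | some p => if sig == p then st.2.2.1 + 1 else st.2.2.1
    | none => st.2.2.1),
   (if PySem.Str.len sig == 3 then st.2.2.2.1 + 1 else st.2.2.2.1),
   some sig)

def pvBody (st? : Option (Int × Int × Int × Int × Option String))
    (p : List (String × String) × List (String × String)) :
    Option (Int × Int × Int × Int × Option String) :=
  st?.bind (fun st => (pvSig p).map (fun sig => pvStep st sig))

def pvRep : Option String → List String → Int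
  | _, [] => 0
  | prev, s :: ss => (if prev == some s then 1 else 0) + pvRep (some s) ss

def pvRuns : Option String → List String → Nat
  | _, [] => 0
  | prev, s :: ss => (if prev != some s then 1 else 0) + pvRuns (some s) ss

def pvLastO (prev : Option String) : List String → Option String
  | [] => prev
  | s :: ss => pvLastO (some s) ss

theorem pvBody_none (ps : List (List (String × String) × List (String × String))) :
    ps.foldl pvBody none = none := by
  induction ps with
  | nil => rfl
  | cons p ps ih => simpa [pvBody] using ih

theorem pv_mapM_length {α β : Type} (f : α → Option β) :
    ∀ (ps : List α) (ys : List β), ps.mapM f = some ys → ys.length = ps.length := by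
  intro ps
  induction ps with
  | nil => intro ys h; simp [List.mapM_nil] at h; simp [← h]
  | cons p ps ih =>
    intro ys h
    simp only [List.mapM_cons, Option.bind_eq_bind, Option.pure_def] at h
    cases hf : f p with
    | none => simp [hf] at h
    | some y =>
      simp only [hf, Option.bind_some] at h
      cases hm : ps.mapM f with
      | none => simp [hm] at h
      | some zs =>
        simp only [hm, Option.bind_some, Option.some_inj] at h
        subst h
        simp [ih zs hm]

theorem pv_mapM_mem {α β : Type} (f : α → Option β) :
    ∀ (ps : List α) (ys : List β), ps.mapM f = some ys →
      ∀ y ∈ ys, ∃ x ∈ ps, f x = some y := by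
  intro ps
  induction ps with
  | nil => intro ys h; simp [List.mapM_nil] at h; simp [h]
  | cons p ps ih =>
    intro ys h
    simp only [List.mapM_cons, Option.bind_eq_bind, Option.pure_def] at h
    cases hf : f p with
    | none => simp [hf] at h
    | some y =>
      simp only [hf, Option.bind_some] at h
      cases hm : ps.mapM f with
      | none => simp [hm] at h
      | some zs =>
        simp only [hm, Option.bind_some, Option.some_inj] at h
        subst h
        intro z hz
        rcases List.mem_cons.1 hz with hz | hz
        · exact ⟨p, List.mem_cons_self, by rw [hf, hz]⟩
        · rcases ih zs hm z hz with ⟨x, hx, hfx⟩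
          exact ⟨x, List.mem_cons_of_mem _ hx, hfx⟩

theorem pv_machine (ps : List (List (String × String) × List (String × String)))
    (g b r t : Int) (prev : Option String) :
    ps.foldl pvBody (some (g, b, r, t, prev)) =
      match ps.mapM pvSig with
      | none => none
      | some sigs =>
          some (g + sigs.countP (fun s => decide (2 ≤ PySem.Str.len s)),
                b + sigs.countP (fun s => !decide (2 ≤ PySem.Str.len s)),
                r + pvRep prev sigs,
                t + sigs.countP (fun s => PySem.Str.len s == 3),
                pvLastO prev sigs) := by
  induction ps generalizing g b r t prev with
  | nil => simp [List.mapM_nil, pvRep, pvLastO]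
  | cons p ps ih =>
    simp only [List.foldl_cons, List.mapM_cons, Option.bind_eq_bind, Option.pure_def]
    cases hs : pvSig p with
    | none =>
      simp only [pvBody, hs, Option.map_none, Option.bind_some, Option.bind_none]
      exact pvBody_none ps
    | some sig =>
      simp only [pvBody, hs, Option.map_some, Option.bind_some]
      rw [ih]
      cases hm : ps.mapM pvSig with
      | none => simp
      | some sigs =>
        simp only [Option.bind_some, Option.some_inj]
        simp only [pvStep, pvRep, pvLastO, List.countP_cons, Prod.mk.injEq]
        refine ⟨?_, ?_, ?_, ?_, trivial⟩
        · by_cases h2 : 2 ≤ PySem.Str.len sig <;> simp <;> omega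
        · by_cases h2 : 2 ≤ PySem.Str.len sig <;> simp <;> omega
        · cases prev with
          | none => simp
          | some pv =>
            by_cases heq : sig = pv
            · subst heq; simp; ring
            · simp [heq, Ne.symm heq]
        · by_cases h3 : (PySem.Str.len sig == 3) = true <;> simp <;> omega

-- B's run count over zip([None]+sigs, sigs) is pvRuns
theorem pv_runs_eq (ss : List String) : ∀ (prev : Option String),
    ((prev :: ss.map some).zip ss).countP (fun q => q.1 != some q.2) = pvRuns prev ss := by
  induction ss with
  | nil => intro prev; simp [pvRuns]
  | cons s ss ih =>
    intro prev
    simp only [List.map_cons, List.zip_cons_cons, List.countP_cons, pvRuns, ih (some s)]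
    by_cases h : (prev != some s) = true <;> simp [h] <;> omega

-- matches + run starts = length
theorem pv_rep_runs (ss : List String) : ∀ (prev : Option String),
    pvRep prev ss + (pvRuns prev ss : Int) = (ss.length : Int) := by
  induction ss with
  | nil => intro prev; simp [pvRep, pvRuns]
  | cons s ss ih =>
    intro prev
    simp only [pvRep, pvRuns, List.length_cons]
    have := ih (some s)
    by_cases h : (prev == some s) = true <;> simp [h, bne] <;> push_cast <;> omega

-- length-histogram reads are countP's, and countP(≥2)/countP(<2) split by exact length
theorem pv_hist_getD (sigs : List String) (k : Int) :
    (sigs.foldl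
      (fun d s => d.insert (PySem.Str.len s) (d.getD (PySem.Str.len s) 0 + 1))
      (PySem.Dict.empty : PySem.Dict Int Int)).getD k 0
      = ((sigs.countP (fun s => PySem.Str.len s == k) : Nat) : Int) := by
  rw [← List.foldl_map (f := PySem.Str.len)
        (g := fun (d : PySem.Dict Int Int) x => d.insert x (d.getD x 0 + 1))]
  rw [PySem.Dict.getD_foldl_insert_add_one]
  simp [List.count_eq_countP, List.countP_map, Function.comp_def]

theorem pv_count_split (sigs : List String)
    (h : ∀ s ∈ sigs, PySem.Str.len s = 0 ∨ PySem.Str.len s = 1 ∨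
        PySem.Str.len s = 2 ∨ PySem.Str.len s = 3) :
    ((sigs.countP (fun s => decide (2 ≤ PySem.Str.len s)) : Nat) : Int)
      = (sigs.countP (fun s => PySem.Str.len s == 2) : Nat)
        + (sigs.countP (fun s => PySem.Str.len s == 3) : Nat)
    ∧ ((sigs.countP (fun s => !decide (2 ≤ PySem.Str.len s)) : Nat) : Int)
      = (sigs.countP (fun s => PySem.Str.len s == 0) : Nat)
        + (sigs.countP (fun s => PySem.Str.len s == 1) : Nat) := by
  induction sigs with
  | nil => simp
  | cons s ss ih =>
    have hs : s.length = 0 ∨ s.length = 1 ∨ s.length = 2 ∨ s.length = 3 := by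
      have := h s List.mem_cons_self
      simp only [PySem.Str.len_eq, String.length_toList] at this
      omega
    obtain ⟨ih1, ih2⟩ := ih (fun x hx => h x (List.mem_cons_of_mem _ hx))
    simp only [List.countP_cons]
    constructor <;>
      (rcases hs with hs | hs | hs | hs <;> simp [hs] at ih1 ih2 ⊢ <;>
        push_cast at ih1 ih2 ⊢ <;> omega)

theorem pv_reindex (data : List (List (String × String))) (h2 : 2 ≤ data.length)
    (init : Option (Int × Int × Int × Int × Option String)) :
    (PySem.List.pyRange 0 ((data.length : Int) - 1) 1).foldl
      (fun st? i =>
        st?.bind (fun st =>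
          (change_signature (PySem.Dict.mk (PySem.List.pyGetD data i []))
                            (PySem.Dict.mk (PySem.List.pyGetD data (i + 1) []))).map
            (fun sig =>
              (if 2 ≤ PySem.Str.len sig then st.1 + 1 else st.1,
               if 2 ≤ PySem.Str.len sig then st.2.1 else st.2.1 + 1,
               (match st.2.2.2.2 with
                | some p => if sig == p then st.2.2.1 + 1 else st.2.2.1
                | none => st.2.2.1),
               (if PySem.Str.len sig == 3 then st.2.2.2.1 + 1 else st.2.2.2.1),
               some sig)))) init =
    (data.zip (data.drop 1)).foldl pvBody init := by
  have hlen : (data.zip (data.drop 1)).length = data.length - 1 := by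
    simp only [List.length_zip, List.length_drop]; omega
  have hrange : ((data.length : Int) - 1) = ((data.zip (data.drop 1)).length : Int) := by
    rw [hlen]; omega
  rw [hrange]
  rw [← PySem.List.foldl_pyRange_zero_pyGetD' (data.zip (data.drop 1)) ([], []) pvBody init]
  apply PySem.List.foldl_congr_mem
  intro acc i hi
  rw [PySem.List.mem_pyRange_one] at hi
  obtain ⟨h0, hlt⟩ := hi
  have hilt : i < ((data.zip (data.drop 1)).length : Int) := hlt
  have hi1 : i.toNat + 1 < data.length := by
    rw [hlen] at hilt; omega
  have e1 : PySem.List.pyGetD data i [] = data[i.toNat] :=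
    PySem.List.pyGetD_eq_getElem _ _ h0 (by omega)
  have e2 : PySem.List.pyGetD data (i + 1) [] = data[(i + 1).toNat] :=
    PySem.List.pyGetD_eq_getElem _ _ (by omega) (by omega)
  have e3 : PySem.List.pyGetD (data.zip (data.drop 1)) i ([], []) =
      (data.zip (data.drop 1))[i.toNat] :=
    PySem.List.pyGetD_eq_getElem _ _ h0 hilt
  rw [e1, e2, e3]
  have h1 : (i + 1).toNat = 1 + i.toNat := by omega
  simp only [pvBody, pvSig, pvStep, List.getElem_zip, List.getElem_drop, h1]

theorem pv_ports_equal (data : List (List (String × String))) :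
    analyze_order data = analyze_order_alt data := by
  by_cases h : data.length ≤ 1
  · -- guard branch: data has no adjacent pairs
    have hz : data.zip (PySem.List.slice data (some 1) none) = [] := by
      match data, h with
      | [], _ => rfl
      | [x], _ => rfl
    rw [analyze_order, analyze_order_alt, if_pos h, hz]
    simp
  · have h2 : 2 ≤ data.length := by omega
    have hslice : PySem.List.slice data (some 1) none = data.drop 1 :=
      PySem.List.slice_from data (by omega)
    rw [analyze_order, analyze_order_alt, if_neg h, hslice]
    rw [pv_reindex data h2]
    rw [pv_machine]
    have hfun : (fun p : List (String × String) × List (String × String) =>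
        change_signature_alt (PySem.Dict.mk p.1) (PySem.Dict.mk p.2)) = pvSig := by
      funext p; rw [pvSig, pv_sig_eq]
    rw [hfun]
    cases hm : (data.zip (data.drop 1)).mapM pvSig with
    | none => rfl
    | some sigs =>
      dsimp only
      have hlen : sigs.length = data.length - 1 := by
        have hl := pv_mapM_length pvSig _ _ hm
        rw [List.length_zip, List.length_drop] at hl
        omega
      have hlens : ∀ s ∈ sigs, PySem.Str.len s = 0 ∨ PySem.Str.len s = 1 ∨
          PySem.Str.len s = 2 ∨ PySem.Str.len s = 3 := by
        intro s hs
        rcases pv_mapM_mem pvSig _ _ hm s hs with ⟨p, _, hp⟩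
        exact pv_sig_len _ _ s hp
      obtain ⟨hgood, hbad⟩ := pv_count_split sigs hlens
      have hn : ((data.length : Int) - 1) = (sigs.length : Int) := by
        rw [hlen]; push_cast [Nat.cast_sub (by omega : 1 ≤ data.length)]; ring
      have hrep : pvRep none sigs =
          (sigs.length : Int) - (pvRuns none sigs : Int) := by
        have := pv_rep_runs sigs none; omega
      simp only [pv_hist_getD, pv_runs_eq, hgood, hbad, hn, hrep, zero_add]

-- ===== VERDICT (by name: the statement is the Claim_ definition above) =====
theorem analyze_order_spec : Claim_equal_analyze_order := by
  intro data _ _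
  unfold Spec_analyze_order
  exact pv_ports_equal data
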